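-- pv_equiv track=rewrite | github.com/chilltse/moveback | datasets/data_loader.py | calculate_sgap_seq
-- ===== SOURCE A (Python) =====
-- def calculate_sgap_seq(concepts, max_gap=300):
--     """
--     For each position in a single sequence, calculate gap to NEXT occurrence of same concept.
--
--     Args:
--         concepts: List of concept IDs for one sequence
--         max_gap: Maximum gap value to cap at (default 300)
--
--     Returns:
--         sgap: List of gap values with same length as concepts
--     """
--     seq_len = len(concepts)
--     sgap = [max_gap - 1] * seq_len  # Default: concept never occurs again
--
--     for i in range(seq_len):
--         concept = concepts[i]
--         if concept == -1:  # Skip padding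
--             sgap[i] = 0
--             continue
--         # Find next occurrence of same concept
--         for j in range(i + 1, seq_len):
--             if concepts[j] == concept:
--                 sgap[i] = min(j - i, max_gap - 1)
--                 break
--
--     return sgap
-- ===== SOURCE B (Python) =====
-- def calculate_sgap_seq(concepts, max_gap=300):
--     # One right-to-left pass: next_idx maps each concept to the index of its
--     # nearest occurrence to the right of the current position.
--     n = len(concepts)
--     sgap = [0] * n
--     next_idx = {}
--     for i in range(n - 1, -1, -1):
--         c = concepts[i]
--         if c == -1:
--             sgap[i] = 0
--         else:
--             j = next_idx.get(c)
--             sgap[i] = max_gap - 1 if j is None else min(j - i, max_gap - 1)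
--             next_idx[c] = i
--     return sgap
-- ===== Notes on version B (the rewrite author's own statement) =====
-- stated objective: faster
-- what changed: Replaced the per-position forward scan for the next same-concept occurrence by a single right-to-left pass that maintains a dict from concept to its nearest index seen so far.
import Mathlib
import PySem

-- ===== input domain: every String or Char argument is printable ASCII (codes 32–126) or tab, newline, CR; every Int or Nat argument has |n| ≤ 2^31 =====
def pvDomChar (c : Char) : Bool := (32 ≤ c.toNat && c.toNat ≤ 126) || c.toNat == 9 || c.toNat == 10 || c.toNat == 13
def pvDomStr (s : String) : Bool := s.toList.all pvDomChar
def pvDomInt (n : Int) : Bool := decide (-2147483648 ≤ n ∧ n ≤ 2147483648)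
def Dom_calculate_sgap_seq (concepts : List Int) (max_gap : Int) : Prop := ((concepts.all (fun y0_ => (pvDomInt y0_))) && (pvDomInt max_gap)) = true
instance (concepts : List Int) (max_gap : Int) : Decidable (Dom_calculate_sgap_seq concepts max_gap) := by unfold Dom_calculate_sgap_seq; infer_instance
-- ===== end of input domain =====

-- B replaces A's per-position forward scan by one right-to-left pass with a dict
-- mapping each concept to its nearest index on the right (objective: faster, O(n) vs O(n^2)).

-- ===== PORT A =====
-- inner loop of A: scan forward for the first occurrence of c, returning its offset
def aFind (t : List Int) (c : Int) : Option Int :=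
  match t with
  | [] => none
  | x :: r => if x = c then some 0 else (aFind r c).map (· + 1)

def calculate_sgap_seq (concepts : List Int) (max_gap : Int) : List Int :=
  match concepts with
  | [] => []
  | c :: t =>
    (if c = -1 then 0
     else match aFind t c with
       | some k => min (k + 1) (max_gap - 1)
       | none => max_gap - 1) :: calculate_sgap_seq t max_gap

-- ===== PORT B =====
-- reversed loop of Source B: process later positions first, threading next_idx
def bLoop (l : List Int) (pos mg : Int) (d : PySem.Dict Int Int) : List Int × PySem.Dict Int Int :=
  match l with
  | [] => ([], d)
  | c :: t =>
    let r := bLoop t (pos + 1) mg d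
    if c = -1 then (0 :: r.1, r.2)
    else
      let v : Int := match r.2.get? c with
        | none => mg - 1
        | some j => min (j - pos) (mg - 1)
      (v :: r.1, r.2.insert c pos)

def calculate_sgap_seq_alt (concepts : List Int) (max_gap : Int) : List Int :=
  (bLoop concepts 0 max_gap PySem.Dict.empty).1

-- ===== PRECONDITION & SPEC =====
def Spec_calculate_sgap_seq (concepts : List Int) (max_gap : Int) (out : List Int) : Prop := out = calculate_sgap_seq_alt concepts max_gap
instance (concepts : List Int) (max_gap : Int) (out : List Int) : Decidable (Spec_calculate_sgap_seq concepts max_gap out) := by unfold Spec_calculate_sgap_seq; infer_instance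

-- ===== CLAIM (what is proved, stated in full; the proofs are below) =====
def Claim_equal_calculate_sgap_seq : Prop := ∀ (concepts : List Int) (max_gap : Int), Dom_calculate_sgap_seq concepts max_gap → Spec_calculate_sgap_seq concepts max_gap (calculate_sgap_seq concepts max_gap)

-- ===== LEMMAS AND PROOFS =====

-- the dict after processing t from base position pos records pos + (offset of the
-- first occurrence of c in t), for every non-padding concept c
theorem bLoop_dict_get (t : List Int) (pos mg : Int) (c : Int) (hc : c ≠ -1) :
    ((bLoop t pos mg PySem.Dict.empty).2).get? c = (aFind t c).map (fun k => pos + k) := by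
  induction t generalizing pos with
  | nil => simp [bLoop, aFind, PySem.Dict.get?_empty]
  | cons x r ih =>
    simp only [bLoop, aFind]
    by_cases hx : x = -1
    · have hmc : ¬ ((-1 : Int) = c) := fun h => hc h.symm
      simp [hx, hmc, ih]
      cases aFind r c <;> simp [hmc] <;> omega
    · simp only [if_neg hx]
      rw [PySem.Dict.get?_insert]
      by_cases hcx : c = x
      · simp [hcx]
      · have hxc : ¬ (x = c) := fun h => hcx h.symm
        simp [hcx, hxc, ih]
        cases aFind r c <;> simp <;> ring

theorem bLoop_fst_eq (l : List Int) (pos mg : Int) :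
    (bLoop l pos mg PySem.Dict.empty).1 = calculate_sgap_seq l mg := by
  induction l generalizing pos with
  | nil => simp [bLoop, calculate_sgap_seq]
  | cons c t ih =>
    simp only [bLoop, calculate_sgap_seq]
    by_cases hc : c = -1
    · simp [hc, ih (pos + 1)]
    · simp only [if_neg hc]
      rw [bLoop_dict_get t (pos + 1) mg c hc]
      cases h : aFind t c with
      | none => simp [ih (pos + 1)]
      | some k =>
        have : pos + 1 + k - pos = k + 1 := by ring
        simp [ih (pos + 1), this]

-- ===== VERDICT (by name: the statement is the Claim_ definition above) =====
theorem calculate_sgap_seq_spec : Claim_equal_calculate_sgap_seq := by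
  intro concepts max_gap _
  unfold Spec_calculate_sgap_seq calculate_sgap_seq_alt
  exact (bLoop_fst_eq concepts 0 max_gap).symm
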